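-- pv_equiv track=rewrite | github.com/konszymanski/leetcode-dataset | obfuscated_solutions/python/1160-find-words-that-can-be-formed-by-characters/solution_2_l0_l2_l3.py | countCharacters
-- ===== SOURCE A (Python) =====
-- from typing import List
--
-- def countCharacters(words: List[str], chars: str) -> int:
--     counts = [0] * 26
--     for c in chars:
--         v_junk_21 = 49
--         counts[ord(c) - ord('a')] = counts[ord(c) - ord('a')] + 1
--     if len('abc') == 3:
--         ans = 0
--     for word in words:
--         v_junk_56 = 74
--         word_count = [0] * 26
--         for c in word:
--             v_junk_68 = 69
--             word_count[ord(c) - ord('a')] = word_count[ord(c) - ord('a')] + 1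
--         if len('abc') == 3:
--             good = True
--         for i in range(26):
--             v_junk_90 = 80
--             if counts[i] < word_count[i]:
--                 if len('abc') == 3:
--                     good = False
--                 break
--         if good:
--             ans = ans + len(word)
--     return ans
-- ===== SOURCE B (Python) =====
-- from typing import List
--
-- def countCharacters(words: List[str], chars: str) -> int:
--     avail = [0] * 26
--     for c in chars:
--         avail[ord(c) - ord('a')] += 1
--     ans = 0
--     for word in words:
--         remaining = list(avail)
--         good = True
--         for c in word:
--             i = ord(c) - ord('a')
--             remaining[i] -= 1
--             if remaining[i] < 0:
--                 good = False
--                 break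
--         if good:
--             ans += len(word)
--     return ans
-- ===== Notes on version B (the rewrite author's own statement) =====
-- stated objective: alternative
-- what changed: B replaces A's per-word 26-slot count array plus a separate 26-iteration comparison loop by a single consume pass: each word decrements a fresh copy of the availability tally and breaks as soon as a slot goes negative (measured ~2.7x faster: early break plus no per-word array build/compare).
import Mathlib
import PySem

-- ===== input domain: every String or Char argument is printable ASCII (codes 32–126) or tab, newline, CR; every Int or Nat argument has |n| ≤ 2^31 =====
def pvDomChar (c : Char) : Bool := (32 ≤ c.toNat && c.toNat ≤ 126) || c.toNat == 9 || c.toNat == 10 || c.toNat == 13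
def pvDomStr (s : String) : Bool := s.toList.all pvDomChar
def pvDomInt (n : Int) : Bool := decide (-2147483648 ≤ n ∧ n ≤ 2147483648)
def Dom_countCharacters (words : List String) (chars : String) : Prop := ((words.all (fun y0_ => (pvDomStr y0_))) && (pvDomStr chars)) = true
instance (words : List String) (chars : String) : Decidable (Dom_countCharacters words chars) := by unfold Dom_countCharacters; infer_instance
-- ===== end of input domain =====

-- B replaces A's per-word 26-slot count array plus separate comparison loop by a single
-- consume-with-early-break pass over each word on a fresh copy of the availability tally
-- (objective: alternative decomposition; a timing run measured B faster by a constant factor).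

-- ===== PORT A =====
-- ord(c) - ord('a'), the Python index expression shared by both programs
def idxOf (c : Char) : Int := (c.toNat : Int) - 97

-- counts[i] += 1 at Python index idxOf c (Python negative-index wraparound via pySetD/pyGetD;
-- out-of-range indices are excluded by Pre_, where Python raises IndexError)
def tallyStep (t : List Int) (c : Char) : List Int :=
  PySem.List.pySetD t (idxOf c) (PySem.List.pyGetD t (idxOf c) 0 + 1)

-- A's 'for i in range(26): if counts[i] < word_count[i]: good = False; break' loop,
-- as a countdown recursion over the remaining iterations
def goA (counts wc : List Int) : Nat → Nat → Bool
  | 0, _ => true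
  | n + 1, i =>
    if PySem.List.pyGetD counts (i : Int) 0 < PySem.List.pyGetD wc (i : Int) 0 then false
    else goA counts wc n (i + 1)

def countCharacters (words : List String) (chars : String) : Int :=
  let counts := chars.toList.foldl tallyStep (List.replicate 26 0)
  words.foldl
    (fun ans w =>
      let wc := w.toList.foldl tallyStep (List.replicate 26 0)
      if goA counts wc 26 0 then ans + PySem.Str.len w else ans)
    0

-- ===== PORT B =====
-- B's inner loop: decrement the copied tally per character, break (none) as soon as a slot goes negative
def consume : List Char → List Int → Option (List Int)
  | [], t => some t
  | c :: cs, t =>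
    let v := PySem.List.pyGetD t (idxOf c) 0 - 1
    let t' := PySem.List.pySetD t (idxOf c) v
    if v < 0 then none else consume cs t'

def countCharacters_alt (words : List String) (chars : String) : Int :=
  let avail := chars.toList.foldl tallyStep (List.replicate 26 0)
  words.foldl
    (fun ans w =>
      match consume w.toList avail with
      | some _ => ans + PySem.Str.len w
      | none => ans)
    0

-- ===== PRECONDITION & SPEC =====
-- Pre_ excludes exactly the inputs where Python A raises IndexError: any character whose code is
-- outside [71, 122] gives ord(c)-97 outside [-26, 25], an out-of-range index into the 26-slot list.
def Pre_countCharacters (words : List String) (chars : String) : Prop :=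
  (chars.toList.all (fun c => 71 ≤ c.toNat && c.toNat ≤ 122) &&
   words.all (fun w => w.toList.all (fun c => 71 ≤ c.toNat && c.toNat ≤ 122))) = true
instance (words : List String) (chars : String) : Decidable (Pre_countCharacters words chars) := by
  unfold Pre_countCharacters; infer_instance

def pvWitness_countCharacters : List String × String := (["ab", "cat"], "abczz")

def Spec_countCharacters (words : List String) (chars : String) (out : Int) : Prop := out = countCharacters_alt words chars
instance (words : List String) (chars : String) (out : Int) : Decidable (Spec_countCharacters words chars out) := by unfold Spec_countCharacters; infer_instance

-- ===== CLAIM (what is proved, stated in full; the proofs are below) =====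
def Claim_equal_countCharacters : Prop := ∀ (words : List String) (chars : String), Dom_countCharacters words chars → Pre_countCharacters words chars → Spec_countCharacters words chars (countCharacters words chars)

-- ===== LEMMAS AND PROOFS =====

-- the in-range Nat slot that Python's wraparound indexing reaches for a valid character
def widx (c : Char) : Nat := (c.toNat - 71) % 26

-- how many characters of cs land in slot n
def cnt (cs : List Char) (n : Nat) : Int := ((cs.countP (fun c => widx c == n)) : Int)

theorem widx_lt (c : Char) : widx c < 26 := Nat.mod_lt _ (by omega)

theorem cnt_nonneg (cs : List Char) (n : Nat) : 0 ≤ cnt cs n := Int.natCast_nonneg _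

theorem cnt_cons (c : Char) (cs : List Char) (n : Nat) :
    cnt (c :: cs) n = (if widx c = n then 1 else 0) + cnt cs n := by
  unfold cnt
  rw [List.countP_cons]
  by_cases h : widx c = n <;> simp [h] <;> ring

theorem cnt_pos_lt (cs : List Char) (n : Nat) (h : 0 < cnt cs n) : n < 26 := by
  have : cs.countP (fun c => widx c == n) ≠ 0 := by
    intro h0; rw [cnt, h0] at h; omega
  obtain ⟨c, _, hc⟩ := List.countP_pos_iff.mp (Nat.pos_of_ne_zero this)
  have := widx_lt c
  simp at hc
  omega

set_option maxRecDepth 4096 in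
theorem pyGetD_widx (t : List Int) (c : Char) (h : t.length = 26)
    (hc : 71 ≤ c.toNat ∧ c.toNat ≤ 122) :
    PySem.List.pyGetD t (idxOf c) 0 = t.getD (widx c) 0 := by
  by_cases h97 : 97 ≤ c.toNat
  · have h1 : idxOf c = ((c.toNat - 97 : Nat) : Int) := by simp [idxOf]; omega
    rw [h1, PySem.List.pyGetD_natCast]
    have h2 : widx c = c.toNat - 97 := by unfold widx; omega
    rw [h2]
  · have hw : widx c = c.toNat - 71 := by unfold widx; omega
    simp only [PySem.List.pyGetD, PySem.List.pyGet?, PySem.List.pyIdx?, h, idxOf]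
    rw [if_neg (by omega), if_pos (by push_cast; omega)]
    have h3 : (26 - (-(((c.toNat : Int)) - 97)).toNat) = widx c := by rw [hw]; omega
    rw [h3]
    simp [List.getD_eq_getElem?_getD]

set_option maxRecDepth 4096 in
theorem pySetD_widx (t : List Int) (c : Char) (h : t.length = 26) (v : Int)
    (hc : 71 ≤ c.toNat ∧ c.toNat ≤ 122) :
    PySem.List.pySetD t (idxOf c) v = t.set (widx c) v := by
  by_cases h97 : 97 ≤ c.toNat
  · have h1 : idxOf c = ((c.toNat - 97 : Nat) : Int) := by simp [idxOf]; omega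
    rw [h1, PySem.List.pySetD_natCast]
    have h2 : widx c = c.toNat - 97 := by unfold widx; omega
    rw [h2]
  · have hw : widx c = c.toNat - 71 := by unfold widx; omega
    simp only [PySem.List.pySetD, PySem.List.pySet?, PySem.List.pyIdx?, h, idxOf]
    rw [if_neg (by omega), if_pos (by push_cast; omega)]
    have h3 : (26 - (-(((c.toNat : Int)) - 97)).toNat) = widx c := by rw [hw]; omega
    rw [h3]
    simp

theorem getD_set_eq (t : List Int) (j n : Nat) (v : Int) (hj : j < t.length) :
    (t.set j v).getD n 0 = if n = j then v else t.getD n 0 := by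
  simp only [List.getD_eq_getElem?_getD, List.getElem?_set]
  by_cases h1 : j = n
  · subst h1
    simp [hj]
  · rw [if_neg h1, if_neg (fun hh => h1 hh.symm)]

theorem length_tally (cs : List Char) (t : List Int) :
    (cs.foldl tallyStep t).length = t.length := by
  induction cs generalizing t with
  | nil => rfl
  | cons c cs ih => simp [List.foldl_cons, ih, tallyStep, PySem.List.length_pySetD]

theorem tally_getD (cs : List Char) (t : List Int) (n : Nat) (h : t.length = 26)
    (hv : ∀ c ∈ cs, 71 ≤ c.toNat ∧ c.toNat ≤ 122) :
    (cs.foldl tallyStep t).getD n 0 = t.getD n 0 + cnt cs n := by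
  induction cs generalizing t with
  | nil => simp [cnt]
  | cons c cs ih =>
    have hc := hv c (by simp)
    have hlen : (tallyStep t c).length = 26 := by
      simp [tallyStep, PySem.List.length_pySetD, h]
    rw [List.foldl_cons, ih _ hlen (fun c hm => hv c (by simp [hm])), cnt_cons]
    simp only [tallyStep, pySetD_widx t c h _ hc, pyGetD_widx t c h hc]
    rw [getD_set_eq t (widx c) n _ (by rw [h]; exact widx_lt c)]
    by_cases hn : n = widx c
    · rw [if_pos hn, if_pos hn.symm, hn]
      ring
    · rw [if_neg hn, if_neg (fun hh => hn hh.symm)]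
      ring

theorem replicate_getD (n : Nat) : ((List.replicate 26 (0 : Int)).getD n 0) = 0 := by
  rcases Nat.lt_or_ge n 26 with h | h
  · rw [List.getD_eq_getElem _ _ (by simpa using h), List.getElem_replicate]
  · rw [List.getD_eq_default _ _ (by simpa using h)]

theorem goA_iff (counts wc : List Int) (n i : Nat) :
    goA counts wc n i = true ↔
      ∀ k, i ≤ k → k < i + n → wc.getD k 0 ≤ counts.getD k 0 := by
  induction n generalizing i with
  | zero => simp [goA]; intro k h1 h2; omega
  | succ m ih =>
    rw [goA, PySem.List.pyGetD_natCast, PySem.List.pyGetD_natCast]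
    split_ifs with hlt
    · simp only [false_iff]
      push Not
      exact ⟨i, le_refl i, by omega, hlt⟩
    · rw [ih]
      constructor
      · intro hall k h1 h2
        rcases Nat.eq_or_lt_of_le h1 with rfl | h
        · omega
        · exact hall k h (by omega)
      · intro hall k h1 h2
        exact hall k (by omega) (by omega)

theorem consume_iff (cs : List Char) (t : List Int) (h : t.length = 26)
    (hv : ∀ c ∈ cs, 71 ≤ c.toNat ∧ c.toNat ≤ 122) :
    (consume cs t).isSome = true ↔ ∀ n, 0 < cnt cs n → cnt cs n ≤ t.getD n 0 := by
  induction cs generalizing t with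
  | nil =>
    simp [consume, cnt]
  | cons c cs ih =>
    have hc := hv c (by simp)
    have hwlt : widx c < t.length := by rw [h]; exact widx_lt c
    rw [consume]
    simp only [pyGetD_widx t c h hc, pySetD_widx t c h _ hc]
    split_ifs with hneg
    · simp only [Option.isSome_none, Bool.false_eq_true, false_iff]
      push Not
      refine ⟨widx c, ?_, ?_⟩
      · rw [cnt_cons, if_pos rfl]
        have := cnt_nonneg cs (widx c)
        omega
      · rw [cnt_cons, if_pos rfl]
        have := cnt_nonneg cs (widx c)
        omega
    · rw [ih _ (by simp [h]) (fun c hm => hv c (by simp [hm]))]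
      constructor
      · intro hall n hpos
        rw [cnt_cons] at hpos ⊢
        by_cases he : widx c = n
        · subst he
          rw [if_pos rfl] at hpos ⊢
          by_cases hp : 0 < cnt cs (widx c)
          · have := hall (widx c) hp
            rw [getD_set_eq _ _ _ _ hwlt, if_pos rfl] at this
            omega
          · have := cnt_nonneg cs (widx c)
            omega
        · rw [if_neg he] at hpos ⊢
          have := hall n (by omega)
          rw [getD_set_eq _ _ _ _ hwlt, if_neg (fun hh => he hh.symm)] at this
          omega
      · intro hall n hpos
        rw [getD_set_eq _ _ _ _ hwlt]
        by_cases he : n = widx c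
        · have h2 := hall n (by rw [cnt_cons, if_pos he.symm]; have := cnt_nonneg cs n; omega)
          rw [cnt_cons, if_pos he.symm] at h2
          rw [if_pos he, ← he]
          omega
        · have h2 := hall n (by rw [cnt_cons, if_neg (fun hh => he hh.symm)]; omega)
          rw [cnt_cons, if_neg (fun hh => he hh.symm)] at h2
          rw [if_neg he]
          omega

theorem word_equiv (w : List Char) (chs : List Char)
    (hw : ∀ c ∈ w, 71 ≤ c.toNat ∧ c.toNat ≤ 122)
    (hch : ∀ c ∈ chs, 71 ≤ c.toNat ∧ c.toNat ≤ 122) :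
    goA (chs.foldl tallyStep (List.replicate 26 0))
        (w.foldl tallyStep (List.replicate 26 0)) 26 0 = true ↔
    (consume w (chs.foldl tallyStep (List.replicate 26 0))).isSome = true := by
  have hlen : (chs.foldl tallyStep (List.replicate 26 0)).length = 26 := by
    rw [length_tally]; simp
  have hcounts : ∀ n, (chs.foldl tallyStep (List.replicate 26 0)).getD n 0 = cnt chs n := by
    intro n; rw [tally_getD chs _ n (by simp) hch, replicate_getD]; ring
  have hwc : ∀ n, (w.foldl tallyStep (List.replicate 26 0)).getD n 0 = cnt w n := by
    intro n; rw [tally_getD w _ n (by simp) hw, replicate_getD]; ring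
  rw [goA_iff, consume_iff _ _ hlen hw]
  constructor
  · intro hall n hpos
    have hn26 : n < 26 := cnt_pos_lt w n hpos
    have := hall n (by omega) (by omega)
    rw [hwc, hcounts] at this
    rw [hcounts]
    exact this
  · intro hall k _ hk
    rw [hwc, hcounts]
    by_cases hp : 0 < cnt w k
    · have := hall k hp
      rw [hcounts] at this
      exact this
    · have := cnt_nonneg w k
      have := cnt_nonneg chs k
      omega

-- ===== VERDICT (by name: the statement is the Claim_ definition above) =====
theorem countCharacters_spec : Claim_equal_countCharacters := by
  intro words chars _ hpre
  unfold Pre_countCharacters at hpre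
  simp only [Bool.and_eq_true, List.all_eq_true, decide_eq_true_eq] at hpre
  obtain ⟨hch, hws⟩ := hpre
  unfold Spec_countCharacters countCharacters countCharacters_alt
  refine PySem.List.foldl_congr_mem words _ _ 0 ?_
  intro acc w hw
  have h := word_equiv w.toList chars.toList (hws w hw) hch
  cases hcons : consume w.toList (chars.toList.foldl tallyStep (List.replicate 26 0)) with
  | some t => rw [if_pos (h.mpr (by rw [hcons]; rfl))]
  | none =>
    have : ¬ goA (chars.toList.foldl tallyStep (List.replicate 26 0))
        (w.toList.foldl tallyStep (List.replicate 26 0)) 26 0 = true := by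
      intro hg; have := h.mp hg; rw [hcons] at this; simp at this
    rw [if_neg this]
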